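-- pv_equiv track=rewrite | github.com/viktor1223/Neural-Network-Optimization | Code/test.py | int_to_bit
-- ===== SOURCE A (Python) =====
-- def int_to_bit(i):
--     if i == 0:
--         return "0"
--     s = ''
--     while i:
--         if i & 1 == 1:
--             s = "1" + s
--         else:
--             s = "0" + s
--         i //= 2
--     return s
-- ===== SOURCE B (Python) =====
-- def int_to_bit(i):
--     if i < 2:
--         return str(i)
--     return int_to_bit(i // 2) + str(i & 1)
-- ===== Notes on version B (the rewrite author's own statement) =====
-- stated objective: simpler
-- what changed: Replaces the LSB-first iterative prepend loop with a MSB-first recursion over the quotient (base case i < 2), building the string by recursive descent.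
import Mathlib
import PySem

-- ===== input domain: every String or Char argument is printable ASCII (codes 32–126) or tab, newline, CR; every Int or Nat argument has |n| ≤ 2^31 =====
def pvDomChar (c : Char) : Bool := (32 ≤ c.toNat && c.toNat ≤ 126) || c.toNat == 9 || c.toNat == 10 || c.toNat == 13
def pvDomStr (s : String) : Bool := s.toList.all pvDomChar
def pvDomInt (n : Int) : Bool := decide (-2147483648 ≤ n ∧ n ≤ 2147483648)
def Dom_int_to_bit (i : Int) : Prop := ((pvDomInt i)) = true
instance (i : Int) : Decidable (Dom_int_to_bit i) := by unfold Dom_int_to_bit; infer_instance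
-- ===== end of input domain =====

-- B replaces A's LSB-first iterative prepend loop by a MSB-first recursion over the quotient (simpler decomposition).

-- ===== PORT A =====
-- the 'while i:' loop of A; exact for i ≥ 0 (Pre_): Python's loop never terminates for i < 0,
-- so the guard '0 < i' agrees with 'i ≠ 0' on every admitted run.
def intToBitLoop (i : Int) (s : String) : String :=
  if _h : 0 < i then
    intToBitLoop (PySem.Int.floordiv i 2)
      ((if PySem.Int.band i 1 = 1 then "1" else "0") ++ s)
  else s
termination_by i.toNat
decreasing_by
  rw [PySem.Int.floordiv_eq_ediv_of_pos (by omega)]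
  omega

def int_to_bit (i : Int) : String :=
  if i = 0 then "0" else intToBitLoop i ""

-- ===== PORT B =====
def int_to_bit_alt (i : Int) : String :=
  if _h : i < 2 then PySem.Int.toStr i
  else int_to_bit_alt (PySem.Int.floordiv i 2) ++ PySem.Int.toStr (PySem.Int.band i 1)
termination_by i.toNat
decreasing_by
  rw [PySem.Int.floordiv_eq_ediv_of_pos (by omega)]
  omega

-- ===== PRECONDITION & SPEC =====
-- Pre_ excludes negative i, on which A's 'while i:' loop never terminates (i //= 2 stalls at -1).
def Pre_int_to_bit (i : Int) : Prop := 0 ≤ i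
instance (i : Int) : Decidable (Pre_int_to_bit i) := by unfold Pre_int_to_bit; infer_instance
def pvWitness_int_to_bit : Int := (6)

def Spec_int_to_bit (i : Int) (out : String) : Prop := out = int_to_bit_alt i
instance (i : Int) (out : String) : Decidable (Spec_int_to_bit i out) := by unfold Spec_int_to_bit; infer_instance

-- ===== CLAIM =====
def Claim_equal_int_to_bit : Prop := ∀ (i : Int), Dom_int_to_bit i → Pre_int_to_bit i → Spec_int_to_bit i (int_to_bit i)

-- ===== LEMMAS AND PROOFS =====

theorem loop_eq_alt_append (n : Nat) : ∀ (i : Int) (s : String), i.toNat = n → 0 < i →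
    intToBitLoop i s = int_to_bit_alt i ++ s := by
  induction n using Nat.strong_induction_on with
  | _ n ih =>
    intro i s hn hi
    rw [intToBitLoop]
    simp only [hi, dite_true]
    have h2 : PySem.Int.floordiv i 2 = i / 2 := PySem.Int.floordiv_eq_ediv_of_pos (by omega)
    have hband : PySem.Int.band i 1 = i % 2 := by
      rw [PySem.Int.band_one, PySem.Int.mod_eq_emod_of_pos (by omega)]
    by_cases h1 : i = 1
    · subst h1
      rw [h2, show (1:Int) / 2 = 0 from by decide, hband,
        show (1:Int) % 2 = 1 from by decide, if_pos rfl, intToBitLoop,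
        dif_neg (show ¬ (0:Int) < 0 by norm_num), int_to_bit_alt,
        dif_pos (show (1:Int) < 2 by norm_num),
        show PySem.Int.toStr (1:Int) = "1" from by decide]
    · -- i ≥ 2
      have hi2 : 2 ≤ i := by omega
      have hq : 0 < i / 2 := by omega
      have halt : int_to_bit_alt i
          = int_to_bit_alt (PySem.Int.floordiv i 2) ++ PySem.Int.toStr (PySem.Int.band i 1) := by
        rw [int_to_bit_alt, dif_neg (show ¬ i < 2 by omega)]
      rw [h2, ih (i / 2).toNat (by omega) (i / 2) _ rfl hq, halt, h2, hband,
        String.append_assoc]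
      congr 1
      rcases Int.emod_two_eq_zero_or_one i with h | h
      · rw [h, if_neg (by norm_num), show PySem.Int.toStr (0:Int) = "0" from by decide]
      · rw [h, if_pos rfl, show PySem.Int.toStr (1:Int) = "1" from by decide]

-- ===== VERDICT =====
theorem int_to_bit_spec : Claim_equal_int_to_bit := by
  intro i _ hpre
  unfold Spec_int_to_bit int_to_bit
  by_cases h0 : i = 0
  · subst h0
    rw [if_pos rfl, int_to_bit_alt, dif_pos (show (0:Int) < 2 by norm_num)]
    decide
  · have hi : 0 < i := by simp [Pre_int_to_bit] at hpre; omega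
    rw [if_neg h0, loop_eq_alt_append i.toNat i "" rfl hi]
    simp
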